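-- pv_equiv track=rewrite | github.com/radical-cybertools/radical.edge | src/radical/edge/queue_info_pbs.py | _parse_pbsnodes
-- ===== SOURCE A (Python) =====
-- def _parse_pbsnodes(stdout):
--     """Parse ``pbsnodes -a`` text output into a list of node dicts.
--
--     Each block starts with the node name and contains indented "key = value"
--     lines (or "key: value" on some PBSPro versions).
--     """
--     nodes = []
--     cur = None
--     for raw in stdout.splitlines():
--         if not raw:
--             continue
--         if not raw[0].isspace():
--             if cur is not None:
--                 nodes.append(cur)
--             cur = {'name': raw.strip()}
--             continue
--         if cur is None:
--             continue
--         s = raw.strip()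
--         if '=' in s:
--             k, v = s.split('=', 1)
--         elif ':' in s:
--             k, v = s.split(':', 1)
--         else:
--             continue
--         cur[k.strip()] = v.strip()
--     if cur is not None:
--         nodes.append(cur)
--     return nodes
-- ===== SOURCE B (Python) =====
-- def _parse_pbsnodes(stdout):
--     """Two-pass: segment lines into (header, body) blocks, then map each
--     block to its dict."""
--     blocks = []
--     for raw in stdout.splitlines():
--         if not raw:
--             continue
--         if not raw[0].isspace():
--             blocks.append((raw.strip(), []))
--         elif blocks:
--             h, body = blocks[-1]
--             blocks[-1] = (h, body + [raw])
--     out = []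
--     for header, body in blocks:
--         d = {'name': header}
--         for line in body:
--             s = line.strip()
--             for sep in ('=', ':'):
--                 if sep in s:
--                     k, v = s.split(sep, 1)
--                     d[k.strip()] = v.strip()
--                     break
--         out.append(d)
--     return out
-- ===== Notes on version B (the rewrite author's own statement) =====
-- stated objective: alternative
-- what changed: A's single sweep with a running (nodes, current-dict) accumulator is replaced by two passes: first segment the lines into (header, body-lines) blocks, then map each block to its dict.
import Mathlib
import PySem

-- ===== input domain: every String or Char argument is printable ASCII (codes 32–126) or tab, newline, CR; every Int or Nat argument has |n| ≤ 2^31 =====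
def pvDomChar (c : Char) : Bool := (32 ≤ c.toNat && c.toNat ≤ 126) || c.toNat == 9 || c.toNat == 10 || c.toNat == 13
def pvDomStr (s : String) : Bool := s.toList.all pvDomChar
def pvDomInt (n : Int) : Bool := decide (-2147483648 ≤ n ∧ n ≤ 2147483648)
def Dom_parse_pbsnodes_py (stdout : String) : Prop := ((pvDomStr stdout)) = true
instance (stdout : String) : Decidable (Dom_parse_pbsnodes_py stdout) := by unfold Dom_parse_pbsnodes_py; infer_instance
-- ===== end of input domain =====

-- B replaces A's single running-accumulator sweep by a two-pass segment-then-map decomposition (same cost; objective: alternative).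


-- ===== PORT A =====
-- one loop iteration of A: state = (nodes so far, current node dict or none)
def pvAStep (st : List (PySem.Dict String String) × Option (PySem.Dict String String))
    (raw : String) : List (PySem.Dict String String) × Option (PySem.Dict String String) :=
  if raw = "" then st
  else if !(PySem.Chars.isspace (raw.toList.headD ' ')) then
    ((match st.2 with | some d => st.1 ++ [d] | none => st.1),
     some (PySem.Dict.insert PySem.Dict.empty "name" (PySem.Str.strip raw)))
  else match st.2 with
    | none => st
    | some d =>
      let s := PySem.Str.strip raw
      if PySem.Str.isIn "=" s then
        match PySem.Str.splitMax? s "=" 1 with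
        | some [k, v] => (st.1, some (d.insert (PySem.Str.strip k) (PySem.Str.strip v)))
        | _ => st
      else if PySem.Str.isIn ":" s then
        match PySem.Str.splitMax? s ":" 1 with
        | some [k, v] => (st.1, some (d.insert (PySem.Str.strip k) (PySem.Str.strip v)))
        | _ => st
      else st

def parse_pbsnodes_py (stdout : String) : List (List (String × String)) :=
  let fin := (PySem.Str.splitlines stdout).foldl pvAStep ([], none)
  let nodes := match fin.2 with | some d => fin.1 ++ [d] | none => fin.1
  nodes.map PySem.Dict.items

-- ===== PORT B =====
-- replace the last element of a list
def pvModifyLast {α : Type} (f : α → α) : List α → List α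
  | [] => []
  | [a] => [f a]
  | a :: b :: rest => a :: pvModifyLast f (b :: rest)

-- pass 1 step: segment lines into (header, body-lines) blocks
def pvGStep (blocks : List (String × List String)) (raw : String) : List (String × List String) :=
  if raw = "" then blocks
  else if !(PySem.Chars.isspace (raw.toList.headD ' ')) then
    blocks ++ [(PySem.Str.strip raw, [])]
  else if blocks.isEmpty then blocks
  else pvModifyLast (fun b => (b.1, b.2 ++ [raw])) blocks

-- pass 2 per-line: first separator of '=', ':' present in the stripped line wins
def pvParseLine (d : PySem.Dict String String) (line : String) : PySem.Dict String String :=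
  let s := PySem.Str.strip line
  match ["=", ":"].find? (fun sep => PySem.Str.isIn sep s) with
  | none => d
  | some sep =>
    match PySem.Str.splitMax? s sep 1 with
    | some [k, v] => d.insert (PySem.Str.strip k) (PySem.Str.strip v)
    | _ => d

def pvBuildDict (b : String × List String) : PySem.Dict String String :=
  b.2.foldl pvParseLine (PySem.Dict.insert PySem.Dict.empty "name" b.1)

def parse_pbsnodes_py_alt (stdout : String) : List (List (String × String)) :=
  (((PySem.Str.splitlines stdout).foldl pvGStep []).map pvBuildDict).map PySem.Dict.items

-- ===== PRECONDITION & SPEC =====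
def Spec_parse_pbsnodes_py (stdout : String) (out : List (List (String × String))) : Prop := out = parse_pbsnodes_py_alt stdout
instance (stdout : String) (out : List (List (String × String))) : Decidable (Spec_parse_pbsnodes_py stdout out) := by unfold Spec_parse_pbsnodes_py; infer_instance

-- ===== CLAIM (what is proved, stated in full; the proofs are below) =====
def Claim_equal_parse_pbsnodes_py : Prop := ∀ (stdout : String), Dom_parse_pbsnodes_py stdout → Spec_parse_pbsnodes_py stdout (parse_pbsnodes_py stdout)

-- ===== LEMMAS AND PROOFS =====

-- A's state, read off from B's block list
def pvConv (bs : List (String × List String)) :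
    List (PySem.Dict String String) × Option (PySem.Dict String String) :=
  (bs.dropLast.map pvBuildDict, bs.getLast?.map pvBuildDict)

theorem pvDropLast_append_getLast {α : Type} (bs : List α) :
    bs.dropLast ++ bs.getLast?.toList = bs := by
  induction bs with
  | nil => rfl
  | cons a t ih =>
    cases t with
    | nil => rfl
    | cons b r => simpa using ih

theorem pvModifyLast_ne_nil {α : Type} (f : α → α) (bs : List α) (h : bs ≠ []) :
    pvModifyLast f bs ≠ [] := by
  cases bs with
  | nil => exact absurd rfl h
  | cons a t => cases t <;> simp [pvModifyLast]

theorem pvModifyLast_dropLast {α : Type} (f : α → α) (bs : List α) :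
    (pvModifyLast f bs).dropLast = bs.dropLast := by
  induction bs with
  | nil => rfl
  | cons a t ih =>
    cases t with
    | nil => rfl
    | cons b r =>
      show (a :: pvModifyLast f (b :: r)).dropLast = (a :: b :: r).dropLast
      rw [List.dropLast_cons_of_ne_nil (pvModifyLast_ne_nil f _ (by simp)),
          List.dropLast_cons_of_ne_nil (by simp), ih]

theorem pvModifyLast_getLast {α : Type} (f : α → α) (bs : List α) :
    (pvModifyLast f bs).getLast? = bs.getLast?.map f := by
  induction bs with
  | nil => rfl
  | cons a t ih =>
    cases t with
    | nil => rfl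
    | cons b r =>
      cases r with
      | nil => simp [pvModifyLast]
      | cons c r' =>
        show (a :: b :: pvModifyLast f (c :: r')).getLast? = _
        rw [List.getLast?_cons_cons, List.getLast?_cons_cons]
        exact ih

theorem pvBuildDict_snoc (h : String) (body : List String) (raw : String) :
    pvBuildDict (h, body ++ [raw]) = pvParseLine (pvBuildDict (h, body)) raw := by
  simp [pvBuildDict]

-- A's inline parse of one indented line equals B's pvParseLine
set_option maxHeartbeats 1000000 in
theorem pvAStep_indent (st : List (PySem.Dict String String) × Option (PySem.Dict String String))
    (raw : String) (d : PySem.Dict String String)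
    (h0 : ¬ raw = "") (h1 : (!(PySem.Chars.isspace (raw.toList.headD ' '))) = false)
    (h2 : st.2 = some d) :
    pvAStep st raw = (st.1, some (pvParseLine d raw)) := by
  obtain ⟨ns, cur⟩ := st
  simp only at h2
  subst h2
  simp only [pvAStep, if_neg h0, h1, Bool.false_eq_true, if_false, pvParseLine, List.find?]
  by_cases he : PySem.Str.isIn "=" (PySem.Str.strip raw) = true
  · simp only [he, if_true]
    rcases PySem.Str.splitMax? (PySem.Str.strip raw) "=" 1 with _ | (_ | ⟨k, _ | ⟨v, _ | _⟩⟩) <;> rfl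
  · simp only [Bool.not_eq_true] at he
    by_cases hc : PySem.Str.isIn ":" (PySem.Str.strip raw) = true
    · simp only [he, hc, Bool.false_eq_true, if_false, if_true]
      rcases PySem.Str.splitMax? (PySem.Str.strip raw) ":" 1 with _ | (_ | ⟨k, _ | ⟨v, _ | _⟩⟩) <;> rfl
    · simp only [Bool.not_eq_true] at hc
      simp at he hc
      simp [he, hc]

set_option maxHeartbeats 1000000 in
theorem pvStep_comm (bs : List (String × List String)) (raw : String) :
    pvAStep (pvConv bs) raw = pvConv (pvGStep bs raw) := by
  by_cases h0 : raw = ""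
  · simp [pvAStep, pvGStep, h0]
  · by_cases h1 : (!(PySem.Chars.isspace (raw.toList.headD ' '))) = true
    · -- header line: A flushes cur, B appends a fresh block
      simp only [pvAStep, pvGStep, if_neg h0, h1, if_true, pvConv, Prod.mk.injEq]
      refine ⟨?_, ?_⟩
      · cases hb : bs.getLast? with
        | none =>
          have hnil : bs = [] := List.getLast?_eq_none_iff.mp hb
          subst hnil
          simp
        | some last =>
          have h2 := pvDropLast_append_getLast bs
          rw [hb] at h2
          simp only [Option.toList_some] at h2
          simp only [Option.map_some, List.dropLast_concat]
          calc List.map pvBuildDict bs.dropLast ++ [pvBuildDict last]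
              = List.map pvBuildDict (bs.dropLast ++ [last]) := by simp
            _ = List.map pvBuildDict bs := by rw [h2]
      · simp [pvBuildDict]
    · -- indented line
      simp only [Bool.not_eq_true] at h1
      have h1' : PySem.Chars.isspace (raw.toList.headD ' ') = true := by
        cases hX : PySem.Chars.isspace (raw.toList.headD ' ') with
        | true => rfl
        | false => rw [hX] at h1; simp at h1
      have h1'' : PySem.Chars.isspace (raw.toList.head?.getD ' ') = true := by
        simpa using h1' 
      cases hb : bs.getLast? with
      | none =>
        have hnil : bs = [] := List.getLast?_eq_none_iff.mp hb
        subst hnil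
        simp [pvAStep, pvGStep, pvConv, h0, h1'']
      | some last =>
        have hne : bs ≠ [] := by
          intro h; subst h; simp at hb
        have hEmp : bs.isEmpty = false := by
          cases bs with
          | nil => exact absurd rfl hne
          | cons x t => rfl
        have hA := pvAStep_indent (pvConv bs) raw (pvBuildDict last) h0 (by simp [h1''])
          (by simp [pvConv, hb])
        rw [hA]
        simp only [pvGStep, if_neg h0, h1, Bool.false_eq_true, if_false,
          hEmp, pvConv, Prod.mk.injEq,
          pvModifyLast_dropLast, pvModifyLast_getLast, hb, Option.map_some]
        refine ⟨trivial, ?_⟩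
        obtain ⟨hh, bb⟩ := last
        simp [pvBuildDict_snoc]

theorem pvFold_comm (lines : List String) (bs : List (String × List String)) :
    lines.foldl pvAStep (pvConv bs) = pvConv (lines.foldl pvGStep bs) := by
  induction lines generalizing bs with
  | nil => rfl
  | cons l t ih => simp only [List.foldl_cons, pvStep_comm, ih]

-- ===== VERDICT (by name: the statement is the Claim_ definition above) =====
theorem parse_pbsnodes_py_spec : Claim_equal_parse_pbsnodes_py := by
  intro stdout _
  show parse_pbsnodes_py stdout = parse_pbsnodes_py_alt stdout
  unfold parse_pbsnodes_py parse_pbsnodes_py_alt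
  have h : ([], (none : Option (PySem.Dict String String))) = pvConv [] := rfl
  rw [h, pvFold_comm]
  set bs := (PySem.Str.splitlines stdout).foldl pvGStep []
  simp only [pvConv]
  cases hb : bs.getLast? with
  | none =>
    have : bs = [] := List.getLast?_eq_none_iff.mp hb
    simp [this]
  | some last =>
    have := pvDropLast_append_getLast bs
    rw [hb] at this
    simp only [Option.toList_some] at this
    simp only [Option.map_some]
    calc (bs.dropLast.map pvBuildDict ++ [pvBuildDict last]).map PySem.Dict.items
        = ((bs.dropLast ++ [last]).map pvBuildDict).map PySem.Dict.items := by simp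
      _ = (bs.map pvBuildDict).map PySem.Dict.items := by rw [this]
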